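-- pv_equiv track=rewrite | github.com/MrBrantCode/unitest_baseline | mut_generate/mist_train_taco/taco_13729/solution.py | construct_min_length_string
-- ===== SOURCE A (Python) =====
-- def construct_min_length_string(n: int, k: int, t: str) -> str:
--     """
--     Constructs a string s of minimum possible length such that there are exactly k substrings of s equal to t.
--
--     Parameters:
--     n (int): The length of the string t.
--     k (int): The number of substrings required.
--     t (str): The string t consisting of exactly n lowercase Latin letters.
--
--     Returns:
--     str: The string s of minimum possible length that contains exactly k substrings equal to t.
--     """
--     flag = False
--     for i in range(n - 1, 0, -1):
--         if t[:i] == t[n - i:]: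
--             flag = True
--             result = t
--             for j in range(k - 1):
--                 result += t[i:]
--             return result
--     if not flag:
--         return t * k
-- ===== SOURCE B (Python) =====
-- def construct_min_length_string(n: int, k: int, t: str) -> str:
--     # The overlap t[:b] == t[n-b:] can only be nonempty when t really has length n
--     # (otherwise the two slices always have different lengths), and in that case the
--     # longest such b is the last value of t's KMP prefix function (one linear pass).
--     # The answer overlaps consecutive copies of t by b characters: t + t[b:] * (k-1).
--     b = 0
--     if n == len(t) and n > 0:
--         pi = [0] * n
--         j = 0
--         for i in range(1, n):
--             while j > 0 and t[i] != t[j]: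
--                 j = pi[j - 1]
--             if t[i] == t[j]:
--                 j += 1
--             pi[i] = j
--         b = pi[n - 1]
--     if b > 0:
--         return t + t[b:] * (k - 1)
--     return t * k
-- ===== Notes on version B (the rewrite author's own statement) =====
-- stated objective: alternative
-- what changed: B computes the longest proper border of t with the KMP prefix-function pass and builds the answer as t plus k-1 copies of t[b:] (falling back to t*k when n != len(t), where A's compared slices can never match), replacing A's descending scan that compares a length-i prefix against a length-i suffix for every i.
import Mathlib
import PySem

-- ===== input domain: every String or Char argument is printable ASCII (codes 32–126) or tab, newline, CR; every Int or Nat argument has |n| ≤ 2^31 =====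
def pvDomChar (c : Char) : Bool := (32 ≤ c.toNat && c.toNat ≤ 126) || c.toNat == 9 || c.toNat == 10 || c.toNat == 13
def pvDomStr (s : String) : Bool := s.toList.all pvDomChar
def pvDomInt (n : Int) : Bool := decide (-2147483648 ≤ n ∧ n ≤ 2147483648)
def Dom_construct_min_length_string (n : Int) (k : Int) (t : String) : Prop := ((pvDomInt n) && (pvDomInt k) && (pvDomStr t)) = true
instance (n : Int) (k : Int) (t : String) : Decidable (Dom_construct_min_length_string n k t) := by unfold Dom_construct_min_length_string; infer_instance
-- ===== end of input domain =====

-- B replaces A's descending prefix/suffix-comparison scan by the KMP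
-- prefix function: when n = len(t) the longest proper border of t is the last entry of
-- the prefix function and the answer is t followed by k-1 copies of t[b:]; for n ≠ len(t)
-- the compared slices always have different lengths, so the answer is t*k (objective: alternative).
-- Both ports work on t.toList (Python slicing/indexing/'*' via PySem are exact on code points).

-- ===== PORT A =====
-- inner loop 'result = t; for j in range(k-1): result += t[i:]'
def pvABuild (l : List Char) (i : Int) (k : Int) : List Char :=
  (PySem.List.pyRange 0 (k - 1) 1).foldl
    (fun result _ => result ++ PySem.List.slice l (some i) none) l

-- 'for i in range(n-1, 0, -1): if t[:i] == t[n-i:]: … return result' then 'return t * k'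
def pvALoop (n : Int) (k : Int) (l : List Char) : List Int → List Char
  | [] => PySem.List.pyRepeat l k
  | i :: rest =>
      if PySem.List.slice l none (some i) = PySem.List.slice l (some (n - i)) none then
        pvABuild l i k
      else pvALoop n k l rest

def construct_min_length_string (n : Int) (k : Int) (t : String) : String :=
  String.ofList (pvALoop n k t.toList (PySem.List.pyRange (n - 1) 0 (-1)))

-- ===== PORT B =====
-- 'while j > 0 and t[i] != t[j]: j = pi[j-1]'.  Fuel-driven recursion with fuel = the
-- entering j: each iteration needs j > 0 and sets j to pi[j-1] ≤ j-1 (the stored prefix-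
-- function values are below their index), so fuel j is never exhausted on reachable states.
-- t[i]/t[j] are in range under Pre_, so List.getD is exact there.
def pvKmpWhile (l : List Char) (pi : List Nat) (c : Char) : Nat → Nat → Nat
  | 0, j => j
  | fuel + 1, j =>
      if 0 < j ∧ l.getD j ' ' ≠ c then pvKmpWhile l pi c fuel (pi.getD (j - 1) 0)
      else j

-- one iteration of 'for i in range(1, n)'; Python preallocates pi = [0]*n and assigns
-- pi[i] = j at successive i (entries beyond i are never read), which is the append here.
def pvKmpStep (l : List Char) (st : List Nat × Nat) (i : Nat) : List Nat × Nat :=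
  let j1 := pvKmpWhile l st.1 (l.getD i ' ') st.2 st.2
  let j2 := if l.getD i ' ' = l.getD j1 ' ' then j1 + 1 else j1
  (st.1 ++ [j2], j2)

def construct_min_length_string_alt (n : Int) (k : Int) (t : String) : String :=
  let l := t.toList
  let b : Nat :=
    if n = (l.length : Int) ∧ 0 < n then
      ((PySem.List.pyRange 1 n 1).foldl
        (fun st i => pvKmpStep l st i.toNat) ([0], 0)).1.getD (n - 1).toNat 0
    else 0
  if 0 < b then String.ofList (l ++ PySem.List.pyRepeat (l.drop b) (k - 1))
  else String.ofList (PySem.List.pyRepeat l k)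

-- ===== PRECONDITION & SPEC =====
-- A and B are total (Python slicing never raises, and B only indexes t when n = len(t)),
-- so no Pre_ is needed.
def Spec_construct_min_length_string (n : Int) (k : Int) (t : String) (out : String) : Prop := out = construct_min_length_string_alt n k t
instance (n : Int) (k : Int) (t : String) (out : String) : Decidable (Spec_construct_min_length_string n k t out) := by unfold Spec_construct_min_length_string; infer_instance

-- ===== CLAIM =====
def Claim_equal_construct_min_length_string : Prop :=
  ∀ (n : Int) (k : Int) (t : String), Dom_construct_min_length_string n k t →
    Spec_construct_min_length_string n k t (construct_min_length_string n k t)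

-- ===== LEMMAS AND PROOFS =====

-- b is a border of the prefix of l of length q
def pvIsB (l : List Char) (q b : Nat) : Prop :=
  b < q ∧ l.take b = (l.take q).drop (q - b)

def pvBordb (l : List Char) (q b : Nat) : Bool :=
  decide (b < q) && (l.take b == (l.take q).drop (q - b))

-- length of the longest border of the prefix of length q (0 if none)
def pvMaxB (l : List Char) (q : Nat) : Nat :=
  Nat.findGreatest (fun b => pvBordb l q b = true) q

theorem pvBordb_iff (l : List Char) (q b : Nat) : pvBordb l q b = true ↔ pvIsB l q b := by
  simp [pvBordb, pvIsB]

theorem pvIsB_zero (l : List Char) (q : Nat) (hq : 0 < q) : pvIsB l q 0 := by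
  refine ⟨hq, ?_⟩
  rw [List.take_zero, Nat.sub_zero]
  exact (List.drop_eq_nil_of_le (List.length_take_le _ _)).symm

theorem pvIsB_ext (l : List Char) (q b : Nat) (hq : q < l.length) :
    pvIsB l (q + 1) (b + 1) ↔ pvIsB l q b ∧ l.getD b ' ' = l.getD q ' ' := by
  constructor
  · rintro ⟨hlt, he⟩
    have hbq : b < q := by omega
    have hbl : b < l.length := by omega
    rw [List.take_succ, List.take_succ, List.getElem?_eq_getElem hbl,
      List.getElem?_eq_getElem hq] at he
    have hsub : q + 1 - (b + 1) = q - b := by omega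
    rw [hsub, List.drop_append_of_le_length (by simp [List.length_take]; omega)] at he
    have hlen : (l.take b).length = ((l.take q).drop (q - b)).length := by
      simp [List.length_take, List.length_drop]; omega
    obtain ⟨h1, h2⟩ := List.append_inj he hlen
    have h3 : l[b] = l[q] := by simpa using h2
    refine ⟨⟨hbq, h1⟩, ?_⟩
    rw [List.getD_eq_getElem l ' ' hbl, List.getD_eq_getElem l ' ' hq, h3]
  · rintro ⟨⟨hbq, h1⟩, h2⟩
    have hbl : b < l.length := by omega
    refine ⟨by omega, ?_⟩
    rw [List.take_succ, List.take_succ, List.getElem?_eq_getElem hbl,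
      List.getElem?_eq_getElem hq]
    have hsub : q + 1 - (b + 1) = q - b := by omega
    rw [hsub, List.drop_append_of_le_length (by simp [List.length_take]; omega), h1]
    rw [List.getD_eq_getElem l ' ' hbl, List.getD_eq_getElem l ' ' hq] at h2
    rw [h2]

-- a smaller border of the same prefix is a border of the larger border
theorem pvIsB_bord (l : List Char) (q b' b : Nat)
    (h1 : pvIsB l q b') (h2 : pvIsB l q b) (hlt : b' < b) : pvIsB l b b' := by
  obtain ⟨hb'q, e1⟩ := h1
  obtain ⟨hbq, e2⟩ := h2
  refine ⟨hlt, ?_⟩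
  rw [e1, e2, List.drop_drop]
  congr 1
  omega

theorem pvIsB_trans (l : List Char) (q b c : Nat)
    (h1 : pvIsB l q b) (h2 : pvIsB l b c) : pvIsB l q c := by
  obtain ⟨hbq, e1⟩ := h1
  obtain ⟨hcb, e2⟩ := h2
  refine ⟨by omega, ?_⟩
  rw [e2, e1, List.drop_drop]
  congr 1
  omega

theorem pvMaxB_isB (l : List Char) (q : Nat) (hq : 0 < q) : pvIsB l q (pvMaxB l q) := by
  have h0 : pvBordb l q 0 = true := (pvBordb_iff l q 0).mpr (pvIsB_zero l q hq)
  exact (pvBordb_iff l q _).mp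
    (Nat.findGreatest_spec (P := fun b => pvBordb l q b = true) (Nat.zero_le q) h0)

theorem pvLe_maxB (l : List Char) (q b : Nat) (h : pvIsB l q b) : b ≤ pvMaxB l q :=
  Nat.le_findGreatest (P := fun b => pvBordb l q b = true)
    (Nat.le_of_lt h.1) ((pvBordb_iff l q b).mpr h)

theorem pvMaxB_lt (l : List Char) (q : Nat) (hq : 0 < q) : pvMaxB l q < q :=
  (pvMaxB_isB l q hq).1

-- the while loop preserves "j is a border of prefix i dominating all matching borders"
-- and exits with j = 0 or t[j] = t[i]
theorem pvWhile_spec (l : List Char) (pi : List Nat) (i : Nat) (hi : 0 < i)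
    (hpi : ∀ idx, idx < i → pi.getD idx 0 = pvMaxB l (idx + 1)) :
    ∀ fuel j, j ≤ fuel → pvIsB l i j →
      (∀ b, pvIsB l i b → l.getD b ' ' = l.getD i ' ' → b ≤ j) →
      pvIsB l i (pvKmpWhile l pi (l.getD i ' ') fuel j) ∧
      (∀ b, pvIsB l i b → l.getD b ' ' = l.getD i ' ' →
        b ≤ pvKmpWhile l pi (l.getD i ' ') fuel j) ∧
      (pvKmpWhile l pi (l.getD i ' ') fuel j = 0 ∨
        l.getD (pvKmpWhile l pi (l.getD i ' ') fuel j) ' ' = l.getD i ' ') := by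
  intro fuel
  induction fuel with
  | zero =>
      intro j hle hb hmax
      have hj : j = 0 := by omega
      subst hj
      exact ⟨hb, hmax, Or.inl rfl⟩
  | succ fuel ih =>
      intro j hle hb hmax
      simp only [pvKmpWhile]
      split_ifs with hc
      · obtain ⟨hj0, hne⟩ := hc
        have hjlt : j < i := hb.1
        have hidx : j - 1 + 1 = j := by omega
        have hj' : pi.getD (j - 1) 0 = pvMaxB l j := by
          rw [hpi (j - 1) (by omega), hidx]
        have hmlt : pvMaxB l j < j := pvMaxB_lt l j hj0
        apply ih
        · omega
        · rw [hj']
          exact pvIsB_trans l i j _ hb (pvMaxB_isB l j hj0)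
        · intro b hbi hmatch
          have hbj := hmax b hbi hmatch
          have hbne : b ≠ j := by
            intro e
            exact hne (by rw [← e]; exact hmatch)
          rw [hj']
          exact pvLe_maxB l j b (pvIsB_bord l i b j hbi hb (by omega))
      · push_neg at hc
        refine ⟨hb, hmax, ?_⟩
        by_cases h0 : j = 0
        · exact Or.inl h0
        · exact Or.inr (not_not.mp (fun hne => hne (hc (by omega))))

-- one step of the for-loop turns a correct prefix-function table of length i into one of
-- length i+1, with j tracking the last entry
theorem pvStep_spec (l : List Char) (st : List Nat × Nat) (i : Nat)
    (hi : 0 < i) (hil : i < l.length) (hlen : st.1.length = i)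
    (hpi : ∀ idx, idx < i → st.1.getD idx 0 = pvMaxB l (idx + 1))
    (hj : st.2 = pvMaxB l i) :
    (pvKmpStep l st i).1.length = i + 1 ∧
    (∀ idx, idx < i + 1 → (pvKmpStep l st i).1.getD idx 0 = pvMaxB l (idx + 1)) ∧
    (pvKmpStep l st i).2 = pvMaxB l (i + 1) := by
  have hb0 : pvIsB l i st.2 := by rw [hj]; exact pvMaxB_isB l i hi
  have hmax0 : ∀ b, pvIsB l i b → l.getD b ' ' = l.getD i ' ' → b ≤ st.2 := by
    intro b hb _
    rw [hj]
    exact pvLe_maxB l i b hb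
  obtain ⟨B1, B2, B3⟩ := pvWhile_spec l st.1 i hi hpi st.2 st.2 le_rfl hb0 hmax0
  set j1 := pvKmpWhile l st.1 (l.getD i ' ') st.2 st.2 with hj1
  have key : (if l.getD i ' ' = l.getD j1 ' ' then j1 + 1 else j1) = pvMaxB l (i + 1) := by
    by_cases hm : l.getD i ' ' = l.getD j1 ' '
    · rw [if_pos hm]
      apply le_antisymm
      · exact pvLe_maxB l (i + 1) (j1 + 1) ((pvIsB_ext l i j1 hil).mpr ⟨B1, hm.symm⟩)
      · rcases Nat.eq_zero_or_pos (pvMaxB l (i + 1)) with h0 | hpos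
        · omega
        · have hM : pvIsB l (i + 1) (pvMaxB l (i + 1)) := pvMaxB_isB l (i + 1) (by omega)
          have hMe : pvMaxB l (i + 1) - 1 + 1 = pvMaxB l (i + 1) := by omega
          rw [← hMe] at hM
          obtain ⟨hMb, hMc⟩ := (pvIsB_ext l i (pvMaxB l (i + 1) - 1) hil).mp hM
          have := B2 (pvMaxB l (i + 1) - 1) hMb hMc
          omega
    · rw [if_neg hm]
      have hj10 : j1 = 0 := by
        rcases B3 with h | h
        · exact h
        · exact absurd h.symm hm
      rw [hj10]
      by_contra hne
      have hpos : 0 < pvMaxB l (i + 1) := by omega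
      have hM : pvIsB l (i + 1) (pvMaxB l (i + 1)) := pvMaxB_isB l (i + 1) (by omega)
      have hMe : pvMaxB l (i + 1) - 1 + 1 = pvMaxB l (i + 1) := by omega
      rw [← hMe] at hM
      obtain ⟨hMb, hMc⟩ := (pvIsB_ext l i (pvMaxB l (i + 1) - 1) hil).mp hM
      have hle0 := B2 (pvMaxB l (i + 1) - 1) hMb hMc
      have hz : pvMaxB l (i + 1) - 1 = 0 := by omega
      rw [hz] at hMc
      rw [hj10] at hm
      exact hm hMc.symm
  refine ⟨by simp [pvKmpStep, hlen], ?_, by simp only [pvKmpStep]; exact key⟩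
  intro idx hidx
  simp only [pvKmpStep]
  rcases Nat.lt_or_ge idx i with hlt | hge
  · rw [List.getD_append _ _ _ idx (by omega)]
    exact hpi idx hlt
  · have hidx' : idx = i := by omega
    subst hidx'
    rw [List.getD_append_right st.1 _ 0 idx (Nat.le_of_eq hlen), hlen]
    simpa using key

-- invariant of the whole fold over range(1, n)
theorem pvFold_inv (l : List Char) (hm : 0 < l.length) :
    ∀ c : Nat, c ≤ l.length - 1 →
      (((PySem.List.pyRange 1 ((c + 1 : Nat) : Int) 1).foldl
          (fun st i => pvKmpStep l st i.toNat) ([0], 0)).1.length = c + 1) ∧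
      (∀ idx, idx < c + 1 →
        ((PySem.List.pyRange 1 ((c + 1 : Nat) : Int) 1).foldl
          (fun st i => pvKmpStep l st i.toNat) ([0], 0)).1.getD idx 0 = pvMaxB l (idx + 1)) ∧
      ((PySem.List.pyRange 1 ((c + 1 : Nat) : Int) 1).foldl
          (fun st i => pvKmpStep l st i.toNat) ([0], 0)).2 = pvMaxB l (c + 1) := by
  intro c
  induction c with
  | zero =>
      intro _
      rw [PySem.List.pyRange_one_eq_nil (by norm_num)]
      have h1 : pvMaxB l 1 = 0 := by
        have := pvMaxB_lt l 1 one_pos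
        omega
      refine ⟨rfl, ?_, by simpa using h1.symm⟩
      intro idx hidx
      have : idx = 0 := by omega
      subst this
      simpa using h1.symm
  | succ c ih =>
      intro hc
      obtain ⟨ihL, ihG, ihJ⟩ := ih (by omega)
      have hcast : ((c + 1 + 1 : Nat) : Int) = ((c + 1 : Nat) : Int) + 1 := by push_cast; ring
      rw [hcast, PySem.List.pyRange_one_succ_right (by exact_mod_cast Nat.succ_le_succ (Nat.zero_le c))]
      rw [List.foldl_append]
      simp only [List.foldl_cons, List.foldl_nil]
      have hto : (((c + 1 : Nat) : Int)).toNat = c + 1 := by omega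
      rw [hto]
      exact pvStep_spec l _ (c + 1) (by omega) (by omega) ihL ihG ihJ

-- A's descending scan returns the build at the longest border (or t*k if there is none)
theorem pvScanA (l : List Char) (k : Int) (hm : 0 < l.length) :
    ∀ i : Nat, i ≤ l.length - 1 → pvMaxB l l.length ≤ i →
      pvALoop (l.length : Int) k l (PySem.List.pyRange (i : Int) 0 (-1)) =
      if 0 < pvMaxB l l.length then pvABuild l ((pvMaxB l l.length : Nat) : Int) k
      else PySem.List.pyRepeat l k := by
  intro i
  induction i with
  | zero =>
      intro _ hle
      have h0 : pvMaxB l l.length = 0 := by omega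
      rw [PySem.List.pyRange_neg_one_eq_nil (by simp)]
      simp [pvALoop, h0]
  | succ i ih =>
      intro hle hmax
      rw [PySem.List.pyRange_neg_one_cons (by exact_mod_cast Nat.succ_pos i)]
      have hdec : ((i + 1 : Nat) : Int) - 1 = (i : Nat) := by push_cast; ring
      rw [hdec]
      simp only [pvALoop]
      have hi1 : i + 1 < l.length := by omega
      have hfrom : (l.length : Int) - ((i + 1 : Nat) : Int) = ((l.length - (i + 1) : Nat) : Int) := by
        omega
      rw [PySem.List.slice_to_natCast, hfrom, PySem.List.slice_from_natCast]
      by_cases hc : l.take (i + 1) = l.drop (l.length - (i + 1))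
      · rw [if_pos hc]
        have hisb : pvIsB l l.length (i + 1) :=
          ⟨hi1, by rw [List.take_length]; exact hc⟩
        have h1 : i + 1 ≤ pvMaxB l l.length := pvLe_maxB l l.length (i + 1) hisb
        have h2 : pvMaxB l l.length = i + 1 := by omega
        rw [if_pos (by omega), h2]
      · rw [if_neg hc]
        have hne : pvMaxB l l.length ≠ i + 1 := by
          intro e
          have hisb := pvMaxB_isB l l.length hm
          rw [e] at hisb
          have h2 := hisb.2
          rw [List.take_length] at h2
          exact hc h2
        exact ih (by omega) (by omega)

-- the append loop of A is 'init ++ (v repeated L.length times)'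
theorem pvFoldlAppendConst (L : List Int) (v : List Char) :
    ∀ init : List Char,
      L.foldl (fun r (_ : Int) => r ++ v) init = init ++ (List.replicate L.length v).flatten := by
  induction L with
  | nil => intro init; simp
  | cons x xs ih =>
      intro init
      simp only [List.foldl_cons, List.length_cons, List.replicate_succ, List.flatten_cons]
      rw [ih, List.append_assoc]

theorem pvRepeat_eq (xs : List Char) (c : Int) :
    PySem.List.pyRepeat xs c = (List.replicate c.toNat xs).flatten := by
  simp [PySem.List.pyRepeat]

theorem pvABuild_eq (l : List Char) (b : Nat) (k : Int) :
    pvABuild l ((b : Nat) : Int) k = l ++ PySem.List.pyRepeat (l.drop b) (k - 1) := by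
  unfold pvABuild
  rw [PySem.List.slice_from_natCast, pvFoldlAppendConst, PySem.List.length_pyRange_one,
    pvRepeat_eq, show k - 1 - 0 = k - 1 from by ring]

theorem pvRepeat_nil (c : Int) : PySem.List.pyRepeat ([] : List Char) c = [] := by
  simp [pvRepeat_eq]

theorem pvABuild_nil (i k : Int) : pvABuild [] i k = [] := by
  unfold pvABuild
  rw [pvFoldlAppendConst]
  simp [PySem.List.slice_some_none]

-- on the empty string A always returns the empty string
theorem pvALoop_nil (n k : Int) : ∀ ds : List Int, pvALoop n k [] ds = [] := by
  intro ds
  induction ds with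
  | nil => exact pvRepeat_nil k
  | cons i rest ih =>
      simp only [pvALoop]
      split_ifs with hc
      · exact pvABuild_nil i k
      · exact ih

-- for n ≠ len(t) (t nonempty) the compared slices always differ in length, so the scan
-- falls through to t*k
theorem pvScanFail (l : List Char) (n k : Int) (hm : 0 < l.length)
    (hne : n ≠ (l.length : Int)) :
    ∀ ds : List Int, (∀ i ∈ ds, 1 ≤ i ∧ i ≤ n - 1) →
      pvALoop n k l ds = PySem.List.pyRepeat l k := by
  intro ds
  induction ds with
  | nil => intro _; rfl
  | cons i rest ih =>
      intro hmem
      obtain ⟨h1, h2⟩ := hmem i List.mem_cons_self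
      simp only [pvALoop]
      rw [if_neg ?_]
      · exact ih (fun j hj => hmem j (List.mem_cons_of_mem i hj))
      · intro hceq
        rw [PySem.List.slice_to l (by omega : (0 : Int) ≤ i),
          PySem.List.slice_from l (by omega : (0 : Int) ≤ n - i)] at hceq
        have hlen := congrArg List.length hceq
        rw [List.length_take, List.length_drop] at hlen
        rw [Nat.min_def] at hlen
        split_ifs at hlen <;> omega

-- ===== VERDICT (by name: the statement is the Claim_ definition above) =====
theorem construct_min_length_string_spec : Claim_equal_construct_min_length_string := by
  intro n k t _
  unfold Spec_construct_min_length_string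
  unfold construct_min_length_string construct_min_length_string_alt
  dsimp only
  rcases Nat.eq_zero_or_pos t.toList.length with h0 | hpos
  · have hnil : t.toList = [] := List.eq_nil_of_length_eq_zero h0
    rw [hnil, pvALoop_nil]
    rw [if_neg (show ¬(n = (([] : List Char).length : Int) ∧ 0 < n) from by
      simp only [List.length_nil, Nat.cast_zero]; omega)]
    simp [pvRepeat_nil]
  · by_cases hn : n = (t.toList.length : Int)
    · subst hn
      set l := t.toList with hl
      obtain ⟨hL, hG, _⟩ := pvFold_inv l hpos (l.length - 1) le_rfl
      have hlen1 : l.length - 1 + 1 = l.length := by omega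
      rw [hlen1] at hG
      have hidx : ((l.length : Int) - 1).toNat = l.length - 1 := by omega
      have hb : ((PySem.List.pyRange 1 ((l.length : Nat) : Int) 1).foldl
          (fun st i => pvKmpStep l st i.toNat) ([0], 0)).1.getD ((l.length : Int) - 1).toNat 0 =
          pvMaxB l l.length := by
        rw [hidx]
        have := hG (l.length - 1) (by omega)
        rw [this, hlen1]
      have hsc := pvScanA l k hpos (l.length - 1) le_rfl
        (by have := pvMaxB_lt l l.length hpos; omega)
      rw [show ((l.length - 1 : Nat) : Int) = (l.length : Int) - 1 from by omega] at hsc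
      rw [hsc]
      rw [if_pos (show (l.length : Int) = (l.length : Int) ∧ 0 < (l.length : Int) from
        ⟨rfl, by exact_mod_cast hpos⟩)]
      rw [hb]
      by_cases hpos2 : 0 < pvMaxB l l.length
      · rw [if_pos hpos2, if_pos hpos2, pvABuild_eq]
      · rw [if_neg hpos2, if_neg hpos2]
    · set l := t.toList with hl
      rw [pvScanFail l n k hpos hn (PySem.List.pyRange (n - 1) 0 (-1))
        (fun i hi => by rw [PySem.List.mem_pyRange_neg_one] at hi; omega)]
      rw [if_neg (show ¬(n = (l.length : Int) ∧ 0 < n) from fun h => hn h.1)]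
      simp
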